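-- pv_equiv track=rewrite | github.com/YangHee-Min/INF8775Lab | tp3/TP3-H23/gen_enc.py | center_table_and_double_size
-- ===== SOURCE A (Python) =====
-- def center_table_and_double_size(table):
--     rows = len(table)
--     cols = len(table[0])
--     new_rows = rows * 2
--     new_cols = cols * 2
--
--     centered_table = [[None for j in range(new_cols)] for i in range(new_rows)]
--
--     start_row = new_rows // 2 - rows // 2
--     start_col = new_cols // 2 - cols // 2
--
--     for i in range(rows):
--         for j in range(cols):
--             centered_table[start_row + i][start_col + j] = table[i][j]
--     return centered_table
-- ===== SOURCE B (Python) =====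
-- def center_table_and_double_size(table):
--     rows = len(table)
--     cols = len(table[0])
--     top = rows - rows // 2
--     left = cols - cols // 2
--     blank = [None] * (cols * 2)
--     result = [list(blank) for _ in range(top)]
--     for row in table:
--         result.append([None] * left + list(row[:cols]) + [None] * (cols // 2))
--     result += [list(blank) for _ in range(rows // 2)]
--     return result
-- ===== Notes on version B (the rewrite author's own statement) =====
-- stated objective: simpler
-- what changed: Instead of pre-allocating a 2r x 2c None grid and scattering each cell into it with nested index loops, B assembles the output row by row: top all-None rows, then each source row as left-padding + row slice + right-padding, then bottom all-None rows; the per-cell indexed stores are replaced by bulk list replication/concatenation, a constant-factor win.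
import Mathlib
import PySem

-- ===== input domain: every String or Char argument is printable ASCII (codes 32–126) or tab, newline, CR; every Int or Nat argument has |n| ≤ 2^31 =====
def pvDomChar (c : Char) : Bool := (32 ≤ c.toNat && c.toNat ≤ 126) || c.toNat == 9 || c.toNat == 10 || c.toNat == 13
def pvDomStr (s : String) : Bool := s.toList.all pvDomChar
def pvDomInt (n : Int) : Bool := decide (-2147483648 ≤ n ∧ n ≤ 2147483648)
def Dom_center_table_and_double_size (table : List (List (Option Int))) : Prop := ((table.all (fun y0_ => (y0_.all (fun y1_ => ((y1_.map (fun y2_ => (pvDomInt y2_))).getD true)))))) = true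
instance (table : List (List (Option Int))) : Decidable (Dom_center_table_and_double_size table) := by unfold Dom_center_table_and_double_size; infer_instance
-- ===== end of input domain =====

-- B builds the centered double-sized grid by concatenating padded rows instead of scattering
-- cells into a pre-allocated grid (objective: simpler); return values proved equal wherever A returns.

-- ===== PORT A =====
-- 'centered_table[r][c] = v': list assignment; both indices are nonnegative and in range on Pre_, where this is exact
def pvSet2 (g : List (List (Option Int))) (r c : Int) (v : Option Int) : List (List (Option Int)) :=
  g.set r.toNat ((g.getD r.toNat []).set c.toNat v)

def center_table_and_double_size (table : List (List (Option Int))) : List (List (Option Int)) :=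
  let rows : Int := table.length
  -- table[0] raises IndexError on an empty table (outside Pre_); headD is a totalising guard only
  let cols : Int := (table.headD []).length
  let new_rows : Int := rows * 2
  let new_cols : Int := cols * 2
  let centered_table : List (List (Option Int)) :=
    (PySem.List.pyRange 0 new_rows 1).map (fun _ =>
      (PySem.List.pyRange 0 new_cols 1).map (fun _ => (none : Option Int)))
  let start_row := PySem.Int.floordiv new_rows 2 - PySem.Int.floordiv rows 2
  let start_col := PySem.Int.floordiv new_cols 2 - PySem.Int.floordiv cols 2
  -- table[i][j]: both indices nonnegative; in range on Pre_, where pyGetD is exact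
  (PySem.List.pyRange 0 rows 1).foldl (fun g i =>
    (PySem.List.pyRange 0 cols 1).foldl (fun g j =>
      pvSet2 g (start_row + i) (start_col + j)
        (PySem.List.pyGetD (PySem.List.pyGetD table i []) j none)) g) centered_table

-- ===== PORT B =====
def center_table_and_double_size_alt (table : List (List (Option Int))) : List (List (Option Int)) :=
  let rows : Int := table.length
  -- table[0] raises IndexError on an empty table (outside Pre_); headD is a totalising guard only
  let cols : Int := (table.headD []).length
  let top := rows - PySem.Int.floordiv rows 2
  let left := cols - PySem.Int.floordiv cols 2
  let blank : List (Option Int) := List.replicate (cols * 2).toNat (none : Option Int)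
  List.replicate top.toNat blank
    ++ table.map (fun row =>
        List.replicate left.toNat (none : Option Int)
          ++ PySem.List.slice row none (some cols)
          ++ List.replicate (PySem.Int.floordiv cols 2).toNat (none : Option Int))
    ++ List.replicate (PySem.Int.floordiv rows 2).toNat blank

-- ===== PRECONDITION & SPEC =====
-- Pre_ excludes exactly the inputs on which A raises IndexError: the empty table (table[0])
-- and tables whose some row is shorter than the first row (table[i][j] for j < len(table[0])).
def Pre_center_table_and_double_size (table : List (List (Option Int))) : Prop :=
  table ≠ [] ∧ ∀ row ∈ table, (table.headD []).length ≤ row.length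

instance (table : List (List (Option Int))) : Decidable (Pre_center_table_and_double_size table) := by
  unfold Pre_center_table_and_double_size; infer_instance

def pvWitness_center_table_and_double_size : List (List (Option Int)) :=
  [[some 1, none], [some (-2), some 3]]

def Spec_center_table_and_double_size (table : List (List (Option Int))) (out : List (List (Option Int))) : Prop := out = center_table_and_double_size_alt table
instance (table : List (List (Option Int))) (out : List (List (Option Int))) : Decidable (Spec_center_table_and_double_size table out) := by unfold Spec_center_table_and_double_size; infer_instance

-- ===== CLAIM (what is proved, stated in full; the proofs are below) =====
def Claim_equal_center_table_and_double_size : Prop := ∀ (table : List (List (Option Int))), Dom_center_table_and_double_size table → Pre_center_table_and_double_size table → Spec_center_table_and_double_size table (center_table_and_double_size table)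

-- ===== LEMMAS AND PROOFS =====

-- repeated assignment at one fixed outer index R collapses to a single set of the folded row
theorem pv_collapse {α β : Type} (L : List β) (R : Nat) (f : α → β → α) (d₀ : α) :
    ∀ (g : List α), R < g.length →
      L.foldl (fun g b => g.set R (f (g.getD R d₀) b)) g
        = g.set R (L.foldl f (g.getD R d₀)) := by
  induction L with
  | nil =>
    intro g h
    simp [List.getD, List.getElem?_eq_getElem h, List.set_getElem_self]
  | cons b L ih =>
    intro g h
    simp only [List.foldl_cons]
    rw [ih _ (by simpa using h)]
    simp [List.getD, h, List.set_set]

-- scattering values at positions pad..pad+n-1 into an all-d list fills the middle segment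
theorem pv_scatter {α : Type} (v : Nat → α) (d : α) (pad m : Nat) :
    ∀ n, n ≤ m →
      (List.range n).foldl (fun acc j => acc.set (pad + j) (v j))
          (List.replicate pad d ++ List.replicate m d)
        = List.replicate pad d ++ (List.range n).map v ++ List.replicate (m - n) d := by
  intro n
  induction n with
  | zero => intro h; simp
  | succ n ih =>
    intro h
    rw [List.range_succ, List.foldl_append, ih (by omega)]
    simp only [List.foldl_cons, List.foldl_nil, List.map_append, List.map_cons, List.map_nil]
    rw [List.append_assoc, List.set_append_right _ _ (by simp),
        List.set_append_right _ _ (by simp)]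
    have hmn : m - n = (m - (n+1)) + 1 := by omega
    rw [hmn, List.replicate_succ]
    simp [List.append_assoc]

-- outer scatter: each step writes row pad+i computed from its current (still untouched) content
theorem pv_outer {α β : Type} (L : Nat → List β) (f : Nat → α → β → α) (d d₀ : α) (pad m : Nat) :
    ∀ n, n ≤ m →
      (List.range n).foldl
          (fun g i => (L i).foldl (fun g b => g.set (pad + i) (f i (g.getD (pad + i) d₀) b)) g)
          (List.replicate pad d ++ List.replicate m d)
        = List.replicate pad d ++ (List.range n).map (fun i => (L i).foldl (f i) d)
            ++ List.replicate (m - n) d := by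
  intro n
  induction n with
  | zero => intro h; simp
  | succ n ih =>
    intro h
    rw [List.range_succ, List.foldl_append, ih (by omega)]
    simp only [List.foldl_cons, List.foldl_nil]
    have hmn : m - n = (m - (n+1)) + 1 := by omega
    rw [hmn, List.replicate_succ]
    have hlen : (List.replicate pad d ++ List.map (fun i => (L i).foldl (f i) d) (List.range n)
        ++ (d :: List.replicate (m - (n+1)) d)).length = pad + m := by
      simp; omega
    rw [pv_collapse _ (pad + n) _ d₀ _ (by rw [hlen]; omega)]
    have hget : (List.replicate pad d ++ List.map (fun i => (L i).foldl (f i) d) (List.range n)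
        ++ (d :: List.replicate (m - (n+1)) d)).getD (pad + n) d₀ = d := by
      rw [List.append_assoc, List.getD_append_right _ _ _ _ (by simp),
          List.getD_append_right _ _ _ _ (by simp)]
      simp [List.getD]
    rw [hget]
    rw [List.append_assoc, List.set_append_right _ _ (by simp),
        List.set_append_right _ _ (by simp)]
    simp [List.append_assoc]

theorem pv_map_const {α : Type} (n : Nat) (x : α) :
    (PySem.List.pyRange 0 (n : Int) 1).map (fun _ => x) = List.replicate n x := by
  rw [PySem.List.pyRange_zero_nat]
  simp [List.eq_replicate_iff]

theorem pv_map_getD_take {α : Type} (xs : List α) (d : α) (n : Nat) (h : n ≤ xs.length) :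
    (List.range n).map (fun j => xs.getD j d) = xs.take n := by
  apply List.ext_getElem
  · simp; omega
  · intro k h1 h2
    simp at h1 ⊢
    rw [List.getElem?_eq_getElem (by omega)]
    rfl

theorem pv_map_range_getD {α β : Type} (xs : List α) (d : α) (f : α → β) :
    (List.range xs.length).map (fun i => f (xs.getD i d)) = xs.map f := by
  apply List.ext_getElem
  · simp
  · intro k h1 h2
    simp at h1 ⊢
    rw [List.getElem?_eq_getElem (by omega)]
    rfl

theorem pv_main_eq (table : List (List (Option Int)))
    (hrow : ∀ row ∈ table, (table.headD []).length ≤ row.length) :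
    center_table_and_double_size table = center_table_and_double_size_alt table := by
  unfold center_table_and_double_size center_table_and_double_size_alt pvSet2
  dsimp only
  set r := table.length with hr
  set c := (table.headD []).length with hc
  have hcast2 : ∀ n : Nat, ((n : Int) * 2) = ((n * 2 : Nat) : Int) := by intro n; push_cast; ring
  have hfd : ∀ n : Nat, PySem.Int.floordiv (n : Int) 2 = ((n / 2 : Nat) : Int) := by
    intro n
    exact_mod_cast PySem.Int.floordiv_natCast n 2
  have hsr : PySem.Int.floordiv ((r : Int) * 2) 2 - PySem.Int.floordiv (r : Int) 2
      = (((r - r / 2 : Nat)) : Int) := by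
    rw [hcast2, hfd, hfd]; push_cast; omega
  have hsc : PySem.Int.floordiv ((c : Int) * 2) 2 - PySem.Int.floordiv (c : Int) 2
      = (((c - c / 2 : Nat)) : Int) := by
    rw [hcast2, hfd, hfd]; push_cast; omega
  rw [hsr, hsc, hcast2 r, hcast2 c, hfd r, hfd c]
  rw [pv_map_const (c * 2) (none : Option Int)]
  rw [pv_map_const (r * 2) (List.replicate (c*2) (none : Option Int))]
  rw [PySem.List.pyRange_zero_nat r, PySem.List.pyRange_zero_nat c]
  simp only [List.foldl_map, PySem.List.pyGetD_natCast]
  simp only [← Nat.cast_add, Int.toNat_natCast]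
  have h1 : ((r : Int) - ↑(r / 2)).toNat = r - r / 2 := by omega
  have h2 : ((c : Int) - ↑(c / 2)).toNat = c - c / 2 := by omega
  rw [h1, h2]
  simp only [PySem.List.slice_to_natCast]
  have hinner : ∀ i, i < r →
      (List.range c).foldl
        (fun row j => row.set ((c - c / 2) + j) ((table.getD i []).getD j none))
        (List.replicate (c * 2) (none : Option Int))
      = List.replicate (c - c / 2) (none : Option Int)
          ++ (table.getD i []).take c ++ List.replicate (c / 2) (none : Option Int) := by
    intro i hi
    have hmem : table.getD i [] ∈ table := by
      rw [List.getD_eq_getElem _ _ (by omega)]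
      exact List.getElem_mem _
    rw [show c * 2 = (c - c / 2) + (c + c / 2) from by omega, List.replicate_add]
    rw [pv_scatter _ _ _ _ c (by omega)]
    rw [pv_map_getD_take _ _ _ (hrow _ hmem)]
    congr 2
    omega
  rw [show r * 2 = (r - r / 2) + (r + r / 2) from by omega, List.replicate_add]
  refine Eq.trans (pv_outer (fun _ => List.range c)
      (fun i row j => row.set ((c - c / 2) + j) ((table.getD i []).getD j none))
      (List.replicate (c * 2) (none : Option Int)) [] (r - r / 2) (r + r / 2) r (by omega)) ?_
  rw [show (r + r / 2) - r = r / 2 from by omega]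
  congr 1
  congr 1
  rw [List.map_congr_left (fun i hi => hinner i (List.mem_range.mp hi))]
  exact pv_map_range_getD table []
    (fun row => List.replicate (c - c / 2) none ++ List.take c row ++ List.replicate (c / 2) none)

-- ===== VERDICT (by name: the statement is the Claim_ definition above) =====
theorem center_table_and_double_size_spec : Claim_equal_center_table_and_double_size := by
  intro table _ hpre
  exact pv_main_eq table hpre.2
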